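-- pv_equiv track=rewrite | github.com/naksh-atra/Content_X | v3_post_bot.py | is_generic
-- ===== SOURCE A (Python) =====
-- def is_generic(text: str) -> bool:
--     """Check if text is generic commentary that anyone could write."""
--     generic_phrases = [
--         "this is huge", "so important", "game changer",
--         "breaking news", "big announcement", "exciting development",
--         "incredible progress", "revolutionary", "transformational"
--     ]
--     text_lower = text.lower()
--     for phrase in generic_phrases:
--         if phrase in text_lower:
--             return True
--     return False
-- ===== SOURCE B (Python) =====
-- def is_generic(text: str) -> bool:
--     """Check if text is generic commentary that anyone could write."""
--     generic_phrases = (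
--         "this is huge", "so important", "game changer",
--         "breaking news", "big announcement", "exciting development",
--         "incredible progress", "revolutionary", "transformational"
--     )
--     t = text.lower()
--     return any(
--         t.startswith(p, i)
--         for i in range(len(t) + 1)
--         for p in generic_phrases
--     )
-- ===== Notes on version B (the rewrite author's own statement) =====
-- stated objective: alternative
-- what changed: B makes a single left-to-right pass over the start positions of the lowered text and at each position asks whether any of the nine phrases starts there (any + str.startswith with a start index), instead of A running nine separate full substring-containment scans, one per phrase.
import Mathlib
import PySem

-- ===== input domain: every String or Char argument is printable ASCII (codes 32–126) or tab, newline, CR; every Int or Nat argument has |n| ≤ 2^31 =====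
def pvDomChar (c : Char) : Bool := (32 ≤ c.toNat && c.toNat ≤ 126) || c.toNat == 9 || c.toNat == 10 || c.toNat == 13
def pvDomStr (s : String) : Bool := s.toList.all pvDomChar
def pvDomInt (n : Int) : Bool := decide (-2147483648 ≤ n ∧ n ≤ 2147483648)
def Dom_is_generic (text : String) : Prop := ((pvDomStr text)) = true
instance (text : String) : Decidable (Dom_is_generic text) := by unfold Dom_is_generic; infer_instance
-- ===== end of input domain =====

-- B replaces A's nine sequential 'phrase in text' substring scans by one positional pass
-- (at each start index, does any phrase start here?); objective: alternative, same cost.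

-- the phrase list both Pythons spell out literally (shared helper, identical in A and B)
def genericPhrases : List (List Char) :=
  ["this is huge".toList, "so important".toList, "game changer".toList,
   "breaking news".toList, "big announcement".toList, "exciting development".toList,
   "incredible progress".toList, "revolutionary".toList, "transformational".toList]

-- ===== PORT A =====
-- for phrase in generic_phrases: if phrase in text_lower: return True / return False
def is_generic (text : String) : Bool :=
  let textLower := PySem.Chars.lower text.toList
  genericPhrases.any (fun phrase => PySem.Chars.isIn phrase textLower)

-- ===== PORT B =====
-- any(t.startswith(p, i) for i in range(len(t)+1) for p in generic_phrases);
-- t.startswith(p, i) with 0 ≤ i ≤ len(t) is exactly startswith on t[i:], i.e. on t.drop i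
def is_generic_alt (text : String) : Bool :=
  let t := PySem.Chars.lower text.toList
  (List.range (t.length + 1)).any (fun i =>
    genericPhrases.any (fun p => PySem.Chars.startswith (t.drop i) p))

-- ===== PRECONDITION & SPEC =====
def Spec_is_generic (text : String) (out : Bool) : Prop := out = is_generic_alt text
instance (text : String) (out : Bool) : Decidable (Spec_is_generic text out) := by unfold Spec_is_generic; infer_instance

-- ===== CLAIM (what is proved, stated in full; the proofs are below) =====
def Claim_equal_is_generic : Prop := ∀ (text : String), Dom_is_generic text → Spec_is_generic text (is_generic text)

-- ===== LEMMAS AND PROOFS =====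

-- a substring scan equals the positional pass, for any haystack and any phrase list
theorem isIn_eq_positional (t : List Char) (ps : List (List Char)) :
    ps.any (fun p => PySem.Chars.isIn p t)
      = (List.range (t.length + 1)).any (fun i =>
          ps.any (fun p => PySem.Chars.startswith (t.drop i) p)) := by
  rw [Bool.eq_iff_iff]
  simp only [List.any_eq_true, List.mem_range, PySem.Chars.startswith_iff]
  constructor
  · rintro ⟨p, hp, hin⟩
    obtain ⟨j, hj⟩ := (PySem.Chars.exists_prefix_drop_iff_isIn p t).2 hin
    by_cases h : j ≤ t.length
    · exact ⟨j, by omega, p, hp, hj⟩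
    · have : t.drop j = [] := List.drop_eq_nil_of_le (by omega)
      rw [this] at hj
      have hpe : p = [] := List.prefix_nil.mp hj
      exact ⟨t.length, by omega, p, hp, by simp [hpe]⟩
  · rintro ⟨i, _, p, hp, hpre⟩
    exact ⟨p, hp, (PySem.Chars.exists_prefix_drop_iff_isIn p t).1 ⟨i, hpre⟩⟩

-- ===== VERDICT (by name: the statement is the Claim_ definition above) =====
theorem is_generic_spec : Claim_equal_is_generic := by
  intro text _
  unfold Spec_is_generic is_generic is_generic_alt
  exact isIn_eq_positional _ _
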